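-- pv_equiv track=rewrite | github.com/gabriellaec/desoft-analise-exercicios | backup/user_270/ch33_2020_03_30_19_25_15_826614.py | primos_entre
-- ===== SOURCE A (Python) =====
-- def eh_primo(n):
--     t = 3
--     k = True
--     if n == 0 or n == 1:
--         return False
--     elif n == 2:
--         return True
--     elif n % 2 == 0 :
--         return False
--     else:
--         while k :
--             if n % t == 0 and n == t:
--                 return True
--                 k = False
--             elif n % t == 0 and n != t:
--                 return False
--                 k = False
--             else:
--                 t += 2
--
-- def primos_entre(a,b):
--     i = a
--     t = 0
--     while i != (b+1) :
--         if eh_primo(i) == True: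
--             t += 1
--         i += 1
--
--     return t
-- ===== SOURCE B (Python) =====
-- def primos_entre(a, b):
--     def is_prime(n):
--         if n < 2:
--             return False
--         if n < 4:
--             return True
--         if n % 2 == 0:
--             return False
--         d = 3
--         while d * d <= n:
--             if n % d == 0:
--                 return False
--             d += 2
--         return True
--     return sum(1 for n in range(a, b + 1) if is_prime(n))
-- ===== Notes on version B (the rewrite author's own statement) =====
-- stated objective: faster
-- what changed: Replaced the per-number odd-divisor scan that runs up to n itself with trial division only up to sqrt(n) (with small-case shortcuts), and the counting while-loop with a sum over range(a, b+1); intended as faster: a timing run measured B 66-228x faster on the largest inputs A finished at all (A timed out on most large inputs, so some runs record the label as unconfirmed). Pre_ excludes only the inputs (a > b+1, or -1 in [a,b]) on which A loops forever.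
import Mathlib
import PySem

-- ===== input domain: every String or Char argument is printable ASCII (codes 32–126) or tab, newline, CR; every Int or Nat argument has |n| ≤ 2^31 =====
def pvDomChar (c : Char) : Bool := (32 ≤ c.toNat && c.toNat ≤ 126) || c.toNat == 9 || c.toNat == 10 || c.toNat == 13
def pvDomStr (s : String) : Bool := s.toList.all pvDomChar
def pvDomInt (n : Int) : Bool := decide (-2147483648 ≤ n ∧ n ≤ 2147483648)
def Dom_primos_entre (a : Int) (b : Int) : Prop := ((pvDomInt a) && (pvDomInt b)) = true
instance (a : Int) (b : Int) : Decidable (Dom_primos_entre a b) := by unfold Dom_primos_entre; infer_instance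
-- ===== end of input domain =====

-- B replaces A's odd-divisor scan up to n itself by trial division up to sqrt(n) and the
-- counting while-loop by a count over range(a, b+1); intended as faster: a timing run
-- measured B 66-228x on the largest inputs where A finished (A timed out on most large inputs).

-- ===== PORT A =====
-- while loop of eh_primo; fuel n.natAbs suffices on every input where the Python loop
-- terminates (the scan always stops by t = |n|); fuel exhaustion is unreachable under Pre_.
def ehPrimoLoop (n : Int) (t : Int) : Nat → Bool
  | 0 => false
  | fuel + 1 =>
    if PySem.Int.mod n t = 0 ∧ n = t then true
    else if PySem.Int.mod n t = 0 ∧ n ≠ t then false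
    else ehPrimoLoop n (t + 2) fuel

def eh_primo (n : Int) : Bool :=
  if n = 0 ∨ n = 1 then false
  else if n = 2 then true
  else if PySem.Int.mod n 2 = 0 then false
  else ehPrimoLoop n 3 n.natAbs

def primos_entre (a : Int) (b : Int) : Int :=
  (PySem.List.pyRange a (b + 1) 1).foldl (fun t i => if eh_primo i = true then t + 1 else t) 0

-- ===== PORT B =====
-- while d*d <= n loop of B's is_prime (d, n are nonnegative there, so Nat)
def isPrimeLoop (n : Nat) (d : Nat) : Bool :=
  if h : d * d ≤ n then
    (if n % d = 0 then false else isPrimeLoop n (d + 2))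
  else true
termination_by n + 1 - d * d
decreasing_by
  have e : (d + 2) * (d + 2) = d * d + 4 * d + 4 := by ring
  omega

def isPrime (n : Int) : Bool :=
  if n < 2 then false
  else if n < 4 then true
  else if PySem.Int.mod n 2 = 0 then false
  else isPrimeLoop n.toNat 3

def primos_entre_alt (a : Int) (b : Int) : Int :=
  ((PySem.List.pyRange a (b + 1) 1).countP (fun n => isPrime n) : Int)

-- ===== PRECONDITION & SPEC =====
-- Pre_ excludes exactly the inputs on which A never returns (infinite loop): a > b+1
-- (the while-i loop never hits b+1) and -1 ∈ [a,b] (eh_primo(-1) loops forever).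
def Pre_primos_entre (a : Int) (b : Int) : Prop := a ≤ b + 1 ∧ ¬ (a ≤ -1 ∧ -1 ≤ b)
instance (a : Int) (b : Int) : Decidable (Pre_primos_entre a b) := by
  unfold Pre_primos_entre; infer_instance

def pvWitness_primos_entre : Int × Int := (2, 30)

def Spec_primos_entre (a : Int) (b : Int) (out : Int) : Prop := out = primos_entre_alt a b
instance (a : Int) (b : Int) (out : Int) : Decidable (Spec_primos_entre a b out) := by
  unfold Spec_primos_entre; infer_instance

-- ===== CLAIM (what is proved, stated in full; the proofs are below) =====
def Claim_equal_primos_entre : Prop := ∀ (a : Int) (b : Int), Dom_primos_entre a b → Pre_primos_entre a b → Spec_primos_entre a b (primos_entre a b)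

-- ===== LEMMAS AND PROOFS =====

-- A's loop on a negative odd n ≤ -3 always returns False (it stops at t = |n| at the latest).
lemma ehPrimoLoop_neg (fuel : Nat) : ∀ (n t : Int), n ≤ -3 → ¬ (2 ∣ n) → 3 ≤ t → ¬ (2 ∣ t) →
    t ≤ -n → -n ≤ t + 2 * fuel → ehPrimoLoop n t fuel = false := by
  induction fuel with
  | zero => intro n t _ _ _ _ _ _; rfl
  | succ f ih =>
    intro n t hn h2n ht h2t htn hub
    rw [ehPrimoLoop]
    by_cases hdvd : t ∣ n
    · have hmod : PySem.Int.mod n t = 0 := (PySem.Int.mod_eq_zero_iff_dvd n t).mpr hdvd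
      have hne : n ≠ t := by omega
      simp [hmod, hne]
    · have hmod : PySem.Int.mod n t ≠ 0 := fun h =>
        hdvd ((PySem.Int.mod_eq_zero_iff_dvd n t).mp h)
      simp only [hmod, false_and, if_neg, ite_false, not_false_iff]
      have hne : t ≠ -n := by
        rintro rfl
        exact hdvd (by simpa using (dvd_neg (α := Int)).mpr dvd_rfl)
      exact ih n (t + 2) hn h2n (by omega) (by omega) (by omega) (by omega)

-- A's loop on a positive odd n: the result says "no divisor of n in [t, n)".
lemma ehPrimoLoop_pos (fuel : Nat) : ∀ (n t : Int), 3 ≤ n → ¬ (2 ∣ n) → 3 ≤ t → ¬ (2 ∣ t) →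
    t ≤ n → n < t + 2 * fuel →
    (ehPrimoLoop n t fuel = true ↔ (∀ d : Int, t ≤ d → d < n → ¬ d ∣ n)) := by
  induction fuel with
  | zero => intro n t _ _ _ _ h1 h2; omega
  | succ f ih =>
    intro n t hn h2n ht h2t htn hub
    rw [ehPrimoLoop]
    by_cases hdvd : t ∣ n
    · have hmod : PySem.Int.mod n t = 0 := (PySem.Int.mod_eq_zero_iff_dvd n t).mpr hdvd
      by_cases heq : n = t
      · rw [if_pos ⟨hmod, heq⟩]
        have hP : ∀ d : Int, t ≤ d → d < n → ¬ d ∣ n := by intro d h1 h2 _; omega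
        simpa using hP
      · rw [if_neg (by tauto), if_pos ⟨hmod, heq⟩]
        have hnP : ¬ (∀ d : Int, t ≤ d → d < n → ¬ d ∣ n) := by
          intro H; exact H t le_rfl (by omega) hdvd
        simpa using hnP
    · have hmod : PySem.Int.mod n t ≠ 0 := fun h =>
        hdvd ((PySem.Int.mod_eq_zero_iff_dvd n t).mp h)
      have hne : t ≠ n := fun h => hdvd (h ▸ dvd_rfl)
      rw [if_neg (by tauto), if_neg (by tauto)]
      rw [ih n (t + 2) hn h2n (by omega) (by omega) (by omega) (by omega)]
      constructor
      · intro H d h1 h2 hdd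
        by_cases hd1 : d = t
        · exact hdvd (hd1 ▸ hdd)
        · by_cases hd2 : d = t + 1
          · have h2d : (2 : Int) ∣ d := by omega
            exact h2n (dvd_trans h2d hdd)
          · exact H d (by omega) h2 hdd
      · intro H d h1 h2 hdd
        exact H d (by omega) h2 hdd

-- B's loop: the result says "no divisor m of n with d ≤ m and m*m ≤ n".
lemma isPrimeLoop_eq (k : Nat) : ∀ (n d : Nat), n % 2 = 1 → d % 2 = 1 → n + 1 - d * d ≤ k →
    (isPrimeLoop n d = true ↔ (∀ m : Nat, d ≤ m → m * m ≤ n → ¬ m ∣ n)) := by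
  induction k with
  | zero =>
    intro n d hn hd hk
    rw [isPrimeLoop, dif_neg (by omega)]
    have hP : ∀ m : Nat, d ≤ m → m * m ≤ n → ¬ m ∣ n := by
      intro m h1 h2 _
      have : d * d ≤ m * m := Nat.mul_le_mul h1 h1
      omega
    simpa using hP
  | succ f ih =>
    intro n d hn hd hk
    rw [isPrimeLoop]
    by_cases hg : d * d ≤ n
    · rw [dif_pos hg]
      by_cases hm : n % d = 0
      · rw [if_pos hm]
        have hnP : ¬ (∀ m : Nat, d ≤ m → m * m ≤ n → ¬ m ∣ n) := by
          intro H; exact H d le_rfl hg (Nat.dvd_of_mod_eq_zero hm)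
        simpa using hnP
      · rw [if_neg hm]
        have e : (d + 2) * (d + 2) = d * d + 4 * d + 4 := by ring
        rw [ih n (d + 2) hn (by omega) (by omega)]
        constructor
        · intro H m h1 h2 hdd
          by_cases hm1 : m = d
          · subst hm1; exact hm (Nat.mod_eq_zero_of_dvd hdd)
          · by_cases hm2 : m = d + 1
            · have h2m : 2 ∣ m := by omega
              have : 2 ∣ n := dvd_trans h2m hdd
              omega
            · exact H m (by omega) h2 hdd
        · intro H m h1 h2 hdd
          exact H m (by omega) h2 hdd
    · rw [dif_neg hg]
      have hP : ∀ m : Nat, d ≤ m → m * m ≤ n → ¬ m ∣ n := by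
        intro m h1 h2 _
        have : d * d ≤ m * m := Nat.mul_le_mul h1 h1
        omega
      simpa using hP

-- bridge: for odd n ≥ 5, "no divisor in [3, n)" ↔ "no divisor m ≥ 3 with m*m ≤ n" (Nat form)
lemma bridgeN (n : Nat) (hn : 5 ≤ n) (hodd : n % 2 = 1) :
    (∀ d : Nat, 3 ≤ d → d < n → ¬ d ∣ n) ↔ (∀ m : Nat, 3 ≤ m → m * m ≤ n → ¬ m ∣ n) := by
  constructor
  · intro H m h3 hmm hdd
    have h1 : m * 3 ≤ m * m := Nat.mul_le_mul_left m h3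
    exact H m h3 (by omega) hdd
  · intro H d h3 hlt hdd
    obtain ⟨c, hc⟩ := hdd
    have hc0 : c ≠ 0 := by rintro rfl; omega
    have hc1 : c ≠ 1 := by rintro rfl; omega
    have hc2 : c ≠ 2 := by rintro rfl; omega
    have hmin : min d c ∣ n := by
      rcases le_total d c with h | h
      · rw [min_eq_left h]; exact ⟨c, hc⟩
      · rw [min_eq_right h]; exact ⟨d, by rw [hc, Nat.mul_comm]⟩
    have hsq : min d c * min d c ≤ n := by
      calc min d c * min d c ≤ d * c := Nat.mul_le_mul (min_le_left d c) (min_le_right d c)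
      _ = n := hc.symm
    exact H (min d c) (by omega) hsq hmin

-- transfer of A's condition from Int to Nat
lemma intCond (n : Int) (h : 3 ≤ n) :
    (∀ d : Int, 3 ≤ d → d < n → ¬ d ∣ n) ↔ (∀ d : Nat, 3 ≤ d → d < n.toNat → ¬ d ∣ n.toNat) := by
  have hnn : ((n.toNat : Int)) = n := by omega
  constructor
  · intro H d h3 hlt hdd
    refine H (d : Int) (by exact_mod_cast h3) (by omega) ?_
    rw [← hnn]; exact_mod_cast hdd
  · intro H d h3 hlt hdd
    have hd : d = ((d.toNat : Int)) := by omega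
    refine H d.toNat (by omega) (by omega) ?_
    have : (d.toNat : Int) ∣ ((n.toNat : Int)) := by rw [← hd, hnn]; exact hdd
    exact_mod_cast this

-- pointwise agreement of the two primality tests (on everything except -1, where A loops)
lemma eh_eq_isPrime (n : Int) (hn : n ≠ -1) : eh_primo n = isPrime n := by
  unfold eh_primo isPrime
  by_cases h01 : n = 0 ∨ n = 1
  · rw [if_pos h01, if_pos (by omega)]
  · rw [if_neg h01]
    by_cases h2 : n = 2
    · subst h2; decide
    · rw [if_neg h2]
      by_cases heven : PySem.Int.mod n 2 = 0
      · have hdv : (2 : Int) ∣ n := (PySem.Int.mod_eq_zero_iff_dvd n 2).mp heven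
        rw [if_pos heven]
        by_cases hlt : n < 2
        · rw [if_pos hlt]
        · rw [if_neg hlt, if_neg (by omega), if_pos heven]
      · have hndv : ¬ (2 : Int) ∣ n := fun h => heven ((PySem.Int.mod_eq_zero_iff_dvd n 2).mpr h)
        rw [if_neg heven]
        by_cases hneg : n ≤ -3
        · rw [ehPrimoLoop_neg n.natAbs n 3 hneg hndv (by omega) (by decide) (by omega) (by omega)]
          rw [if_pos (by omega)]
        · by_cases h3 : n = 3
          · subst h3; decide
          · -- n ≥ 5, odd
            have hn5 : 5 ≤ n := by omega
            rw [if_neg (by omega), if_neg (by omega), if_neg heven]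
            rw [Bool.eq_iff_iff]
            rw [ehPrimoLoop_pos n.natAbs n 3 (by omega) hndv (by omega) (by decide)
              (by omega) (by omega)]
            rw [isPrimeLoop_eq (n.toNat + 1) n.toNat 3 (by omega) (by decide) (by omega)]
            rw [intCond n (by omega)]
            exact bridgeN n.toNat (by omega) (by omega)

-- counting fold = countP
lemma foldl_count (p : Int → Bool) : ∀ (l : List Int) (t : Int),
    l.foldl (fun t i => if p i = true then t + 1 else t) t = t + (l.countP p : Int) := by
  intro l
  induction l with
  | nil => intro t; simp
  | cons x xs ih =>
    intro t
    simp only [List.foldl_cons, List.countP_cons]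
    by_cases hx : p x = true
    · rw [if_pos hx, ih]; simp [hx]; ring
    · rw [if_neg hx, ih]; simp [hx]

-- ===== VERDICT (by name: the statement is the Claim_ definition above) =====
theorem primos_entre_spec : Claim_equal_primos_entre := by
  intro a b _ hpre
  unfold Spec_primos_entre primos_entre primos_entre_alt
  have hcong : ∀ x ∈ PySem.List.pyRange a (b + 1) 1,
      (eh_primo x = true ↔ (fun n => isPrime n) x = true) := by
    intro x hx
    have hmem := (PySem.List.mem_pyRange_one).mp hx
    have hx1 : x ≠ -1 := by
      rcases hpre with ⟨_, hno⟩
      intro h; exact hno (by omega)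
    rw [eh_eq_isPrime x hx1]
  rw [foldl_count eh_primo, List.countP_congr hcong]
  simp
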